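-- pv_equiv track=rewrite | github.com/dzhu/rstfmt | docstrfmt/util.py | get_code_line
-- ===== SOURCE A (Python) =====
-- def get_code_line(current_source, code):
--     lines = current_source.splitlines()
--     code_lines = code.splitlines()
--     multiple = len([line for line in lines if code_lines[0] in line]) > 1
--     for line_number, line in enumerate(lines, 1):
--         if code_lines[0] in line:
--             if multiple:
--                 for offset, sub_line in enumerate(code_lines):
--                     if sub_line not in lines[line_number - 1 + offset]:
--                         break
--                 else:
--                     return line_number
--             else:
--                 return line_number
-- ===== SOURCE B (Python) =====
-- def get_code_line(current_source, code):
--     lines = current_source.splitlines()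
--     if not lines:
--         return None
--     code_lines = code.splitlines()
--     starts = [i for i, line in enumerate(lines) if code_lines[0] in line]
--     if len(starts) == 1:
--         return starts[0] + 1
--     # sieve: narrow the candidate start set by each successive code line
--     full = [i for i in starts if i + len(code_lines) <= len(lines)]
--     for offset, sub_line in enumerate(code_lines):
--         full = [i for i in full if sub_line in lines[i + offset]]
--     return full[0] + 1 if full else None
-- ===== Notes on version B (the rewrite author's own statement) =====
-- stated objective: alternative
-- what changed: B transposes A's loop nesting: A scans source lines and verifies each candidate block with an inner loop over code lines, while B collects 0-based start positions once, returns immediately when unique, and otherwise runs a sieve that iterates over the CODE lines, narrowing the set of candidate start positions at each offset and returning the first survivor; Pre_ excludes exactly the inputs where A raises IndexError (empty code with nonempty source, or a multi-match verification running past EOF).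
import Mathlib
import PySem

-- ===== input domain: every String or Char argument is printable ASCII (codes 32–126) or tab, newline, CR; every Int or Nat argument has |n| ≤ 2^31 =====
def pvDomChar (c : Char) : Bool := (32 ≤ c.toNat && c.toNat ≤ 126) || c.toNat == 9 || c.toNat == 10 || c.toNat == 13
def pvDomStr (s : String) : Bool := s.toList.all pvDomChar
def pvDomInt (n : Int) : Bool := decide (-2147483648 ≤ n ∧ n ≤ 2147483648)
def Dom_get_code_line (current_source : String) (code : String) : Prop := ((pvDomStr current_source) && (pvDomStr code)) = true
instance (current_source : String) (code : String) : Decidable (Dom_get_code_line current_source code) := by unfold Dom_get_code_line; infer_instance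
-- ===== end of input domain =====

-- B transposes A's loop nesting: instead of scanning source lines and verifying each
-- candidate block (inner loop over code lines), B loops over the CODE lines, narrowing
-- a sieve of candidate start positions — alternative algorithm, same cost.

-- ===== PORT A =====
-- inner 'for offset, sub_line in enumerate(code_lines): if sub_line not in lines[...]: break / else: return'
-- (true = the else-branch is reached; lines[...] out of range is an IndexError in Python, outside Pre_, ported as false)
def pvCheckA (lines : List String) : List String → Nat → Bool
  | [], _ => true
  | c :: rest, idx =>
    match PySem.List.pyGet? lines (idx : Int) with
    | none => false
    | some l => if PySem.Str.isIn c l then pvCheckA lines rest (idx + 1) else false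

-- outer 'for line_number, line in enumerate(lines, 1): …'
def pvLoopA (allLines cls : List String) (first : String) (multiple : Bool) : List String → Nat → Option Int
  | [], _ => none
  | l :: rest, ln =>
    if PySem.Str.isIn first l then
      if multiple then
        if pvCheckA allLines cls (ln - 1) then some (ln : Int)
        else pvLoopA allLines cls first multiple rest (ln + 1)
      else some (ln : Int)
    else pvLoopA allLines cls first multiple rest (ln + 1)

def get_code_line (current_source : String) (code : String) : Option Int :=
  let lines := PySem.Str.splitlines current_source
  let cls := PySem.Str.splitlines code
  -- code_lines[0] is evaluated once per line of the comprehension/loop: with lines = [] Python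
  -- never raises and returns None, which this port also yields (pyGet? cls 0 = none → none).
  match PySem.List.pyGet? cls (0 : Int) with
  | none => none
  | some first =>
    let multiple := decide ((lines.filter (fun l => PySem.Str.isIn first l)).length > 1)
    pvLoopA lines cls first multiple lines 1

-- ===== PORT B =====
-- '[i for i, line in enumerate(lines)] if code_lines[0] in line]'  (0-based starts; counter n)
def pvStarts (first : String) : List String → Nat → List Nat
  | [], _ => []
  | l :: rest, n =>
    if PySem.Str.isIn first l then n :: pvStarts first rest (n + 1)
    else pvStarts first rest (n + 1)

-- 'for offset, sub_line in enumerate(code_lines): full = [i for i in full if sub_line in lines[i + offset]]'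
-- (the bounds pre-filter guarantees i + offset is in range, so getD's default is never used)
def pvNarrow (lines : List String) : List String → Nat → List Nat → List Nat
  | [], _, acc => acc
  | sub :: rest, o, acc =>
    pvNarrow lines rest (o + 1) (acc.filter (fun i => PySem.Str.isIn sub (lines.getD (i + o) "")))

def get_code_line_alt (current_source : String) (code : String) : Option Int :=
  let lines := PySem.Str.splitlines current_source
  if lines.isEmpty then none   -- 'if not lines: return None'
  else
    let cls := PySem.Str.splitlines code
    match PySem.List.pyGet? cls (0 : Int) with
    | none => none   -- code_lines[0]: IndexError in Python here (lines nonempty, code empty), outside Pre_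
    | some first =>
      let starts := pvStarts first lines 0
      match starts with
      | [s] => some ((s : Int) + 1)   -- 'if len(starts) == 1: return starts[0] + 1'
      | _ =>
        let full0 := starts.filter (fun i => decide (i + cls.length ≤ lines.length))
        match pvNarrow lines cls 0 full0 with
        | [] => none
        | f :: _ => some ((f : Int) + 1)   -- 'return full[0] + 1 if full else None'

-- ===== PRECONDITION & SPEC =====
-- Pre_ excludes exactly the inputs on which Python A raises IndexError: code with no lines
-- while the source has lines (code_lines[0]), and multi-candidate inputs whose first
-- fully-matching-so-far candidate block runs past the end of lines before any earlier
-- candidate fully matches (lines[line_number - 1 + offset]).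
def Pre_get_code_line (current_source : String) (code : String) : Prop :=
  let lines := PySem.Str.splitlines current_source
  let cls := PySem.Str.splitlines code
  lines = [] ∨ (cls ≠ [] ∧
    ((lines.filter (fun l => PySem.Str.isIn (cls.headD "") l)).length ≤ 1 ∨
     ∀ i ∈ List.range lines.length,
       PySem.Str.isIn (cls.headD "") (lines.getD i "") = true →
       (lines.length < i + cls.length ∧
        ∀ o ∈ List.range (lines.length - i),
          PySem.Str.isIn (cls.getD o "") (lines.getD (i + o) "") = true) →
       ∃ j ∈ List.range i,
         PySem.Str.isIn (cls.headD "") (lines.getD j "") = true ∧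
         j + cls.length ≤ lines.length ∧
         ∀ o ∈ List.range cls.length,
           PySem.Str.isIn (cls.getD o "") (lines.getD (j + o) "") = true))
instance (current_source : String) (code : String) : Decidable (Pre_get_code_line current_source code) := by
  unfold Pre_get_code_line; infer_instance

def pvWitness_get_code_line : String × String := ("abc\ndef", "def")

def Spec_get_code_line (current_source : String) (code : String) (out : Option Int) : Prop := out = get_code_line_alt current_source code
instance (current_source : String) (code : String) (out : Option Int) : Decidable (Spec_get_code_line current_source code out) := by unfold Spec_get_code_line; infer_instance

-- ===== CLAIM (what is proved, stated in full; the proofs are below) =====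
def Claim_equal_get_code_line : Prop := ∀ (current_source : String) (code : String), Dom_get_code_line current_source code → Pre_get_code_line current_source code → Spec_get_code_line current_source code (get_code_line current_source code)

-- ===== LEMMAS AND PROOFS =====

lemma pvStarts_length (first : String) :
    ∀ (lines : List String) (n : Nat),
      (pvStarts first lines n).length = (lines.filter (fun l => PySem.Str.isIn first l)).length := by
  intro lines
  induction lines with
  | nil => intro n; simp [pvStarts]
  | cons l rest ih =>
    intro n
    by_cases h : PySem.Chars.isIn first.toList l.toList <;>
      simp [pvStarts, h, ih]

lemma pvStarts_shift (first : String) :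
    ∀ (lines : List String) (n : Nat),
      pvStarts first lines (n + 1) = (pvStarts first lines n).map (· + 1) := by
  intro lines
  induction lines with
  | nil => intro n; simp [pvStarts]
  | cons l rest ih =>
    intro n
    by_cases h : PySem.Chars.isIn first.toList l.toList <;> simp [pvStarts, h, ih]

lemma pvLoopA_single (allLines cls : List String) (first : String) :
    ∀ (lines : List String) (ln : Nat),
      pvLoopA allLines cls first false lines ln =
        (pvStarts first lines ln).head?.map (fun n => (n : Int)) := by
  intro lines
  induction lines with
  | nil => intro ln; simp [pvLoopA, pvStarts]
  | cons l rest ih =>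
    intro ln
    by_cases h : PySem.Chars.isIn first.toList l.toList <;>
      simp [pvLoopA, pvStarts, h, ih]

lemma pvLoopA_multi (allLines cls : List String) (first : String) :
    ∀ (lines : List String) (ln : Nat),
      pvLoopA allLines cls first true lines ln =
        ((pvStarts first lines ln).find? (fun n => pvCheckA allLines cls (n - 1))).map (fun n => (n : Int)) := by
  intro lines
  induction lines with
  | nil => intro ln; simp [pvLoopA, pvStarts]
  | cons l rest ih =>
    intro ln
    by_cases h : PySem.Chars.isIn first.toList l.toList
    · by_cases hchk : pvCheckA allLines cls (ln - 1) <;>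
        simp [pvLoopA, pvStarts, h, hchk, ih]
    · simp [pvLoopA, pvStarts, h, ih]

-- the conjunction B's sieve computes for a start i, read off recursively
def pvQ (lines : List String) : List String → Nat → Bool
  | [], _ => true
  | c :: rest, j => PySem.Str.isIn c (lines.getD j "") && pvQ lines rest (j + 1)

lemma pvNarrow_filter (lines : List String) :
    ∀ (cls : List String) (o : Nat) (acc : List Nat),
      pvNarrow lines cls o acc = acc.filter (fun i => pvQ lines cls (i + o)) := by
  intro cls
  induction cls with
  | nil => intro o acc; simp [pvNarrow, pvQ]
  | cons c rest ih =>
    intro o acc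
    rw [show pvNarrow lines (c :: rest) o acc =
          pvNarrow lines rest (o + 1) (acc.filter (fun i => PySem.Str.isIn c (lines.getD (i + o) ""))) from rfl,
        ih, List.filter_filter]
    apply List.filter_congr
    intro i _
    show (pvQ lines rest (i + (o + 1)) && PySem.Str.isIn c (lines.getD (i + o) "")) =
         pvQ lines (c :: rest) (i + o)
    rw [show pvQ lines (c :: rest) (i + o) =
          (PySem.Str.isIn c (lines.getD (i + o) "") && pvQ lines rest (i + o + 1)) from rfl]
    rw [show i + (o + 1) = i + o + 1 from by omega, Bool.and_comm]

lemma pvQ_eq_checkA (lines : List String) :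
    ∀ (cls : List String) (j : Nat), j + cls.length ≤ lines.length →
      pvQ lines cls j = pvCheckA lines cls j := by
  intro cls
  induction cls with
  | nil => intro j h; simp [pvQ, pvCheckA]
  | cons c rest ih =>
    intro j h
    have hj : j < lines.length := by simp at h; omega
    have hget : PySem.List.pyGet? lines (j : Int) = some lines[j] :=
      PySem.List.pyGet?_ofNat lines j hj
    have hgetD : lines.getD j "" = lines[j] := List.getD_eq_getElem lines "" hj
    simp only [pvQ, pvCheckA, hget, hgetD]
    by_cases hc : PySem.Chars.isIn c.toList lines[j].toList
    · have hrec := ih (j + 1) (by simp at h ⊢; omega)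
      simp [hc, hrec]
    · simp [hc]

lemma pvCheckA_bounds (lines : List String) :
    ∀ (cls : List String) (j : Nat), pvCheckA lines cls j = true →
      cls = [] ∨ j + cls.length ≤ lines.length := by
  intro cls
  induction cls with
  | nil => intro j _; exact Or.inl rfl
  | cons c rest ih =>
    intro j h
    right
    cases hget : PySem.List.pyGet? lines (j : Int) with
    | none =>
      simp only [pvCheckA, hget] at h
      exact absurd h (by decide)
    | some l =>
      have hj : j < lines.length := by
        have : lines[j]? = some l := by
          rw [← PySem.List.pyGet?_natCast]; exact hget
        exact (List.getElem?_eq_some_iff.mp this).1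
      simp only [pvCheckA, hget] at h
      by_cases hc : PySem.Str.isIn c l
      · rw [if_pos hc] at h
        rcases ih (j + 1) h with rfl | hb
        · simpa using hj
        · simp at hb ⊢; omega
      · rw [if_neg hc] at h; exact absurd h (by simp)

lemma head?_filter {α : Type} (p : α → Bool) :
    ∀ (l : List α), (l.filter p).head? = l.find? p := by
  intro l
  induction l with
  | nil => rfl
  | cons x r ih => by_cases h : p x <;> simp [h, List.find?, ih]

lemma ports_eq (current_source code : String) :
    get_code_line current_source code = get_code_line_alt current_source code := by
  unfold get_code_line get_code_line_alt
  cases hf : PySem.List.pyGet? (PySem.Str.splitlines code) (0 : Int) with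
  | none =>
    simp only [hf]
    by_cases hl : (PySem.Str.splitlines current_source).isEmpty <;> simp [hl]
  | some first =>
    simp only [hf]
    set lines := PySem.Str.splitlines current_source with hlines
    set cls := PySem.Str.splitlines code with hcls
    by_cases hl : lines.isEmpty
    · rw [if_pos hl]
      rw [List.isEmpty_iff] at hl
      rw [hl]
      simp [pvLoopA]
    · rw [if_neg hl]
      have hcls_ne : cls ≠ [] := by
        intro hnil; rw [hnil] at hf; simp [PySem.List.pyGet?] at hf
      have hlen : (lines.filter (fun l => PySem.Str.isIn first l)).length = (pvStarts first lines 0).length :=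
        (pvStarts_length first lines 0).symm
      have hshift : pvStarts first lines 1 = (pvStarts first lines 0).map (· + 1) :=
        pvStarts_shift first lines 0
      have hsieve :
          pvNarrow lines cls 0 ((pvStarts first lines 0).filter (fun i => decide (i + cls.length ≤ lines.length))) =
            (pvStarts first lines 0).filter (fun i => pvCheckA lines cls i) := by
        rw [pvNarrow_filter, List.filter_filter]
        apply List.filter_congr
        intro i hi
        by_cases hb : i + cls.length ≤ lines.length
        · have hq := pvQ_eq_checkA lines cls i hb
          simp [hb, hq]
        · have hfalse : pvCheckA lines cls i = false := by
            cases hck : pvCheckA lines cls i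
            · rfl
            · rcases pvCheckA_bounds lines cls i hck with h0 | h0
              · exact absurd h0 hcls_ne
              · exact absurd h0 hb
          simp [hb, hfalse]
      match hc : pvStarts first lines 0 with
      | [] =>
        have hm : ¬ ((lines.filter (fun l => PySem.Str.isIn first l)).length > 1) := by
          rw [hlen, hc]; simp
        simp only [hm, decide_false]
        rw [pvLoopA_single, hshift, hc]
        rw [hc] at hsieve
        simp only [List.filter_nil] at hsieve
        simp only [List.filter_nil, hsieve]
        simp
      | [s] =>
        have hm : ¬ ((lines.filter (fun l => PySem.Str.isIn first l)).length > 1) := by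
          rw [hlen, hc]; simp
        simp only [hm, decide_false]
        rw [pvLoopA_single, hshift, hc]
        simp
      | s1 :: s2 :: rest =>
        have hm : (lines.filter (fun l => PySem.Str.isIn first l)).length > 1 := by
          rw [hlen, hc]; simp only [List.length_cons]; omega
        simp only [hm, decide_true]
        rw [pvLoopA_multi, hshift, List.find?_map]
        rw [hc] at hsieve
        rw [hc]
        rw [hsieve]
        have hpred : ((fun n => pvCheckA lines cls (n - 1)) ∘ fun x => x + 1) = (fun x => pvCheckA lines cls x) := by
          funext x; simp
        rw [hpred, ← head?_filter]
        cases hfl : (s1 :: s2 :: rest).filter (fun x => pvCheckA lines cls x) with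
        | nil => simp
        | cons f fs => simp

-- ===== VERDICT (by name: the statement is the Claim_ definition above) =====
theorem get_code_line_spec : Claim_equal_get_code_line := by
  intro current_source code _ _
  unfold Spec_get_code_line
  exact ports_eq current_source code
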